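-- pv_equiv track=rewrite | github.com/padaher93/agent-app | src/agent_app_dataset/reporting_obligation_candidates.py | _candidate_rows_for_prompt
-- ===== SOURCE A (Python) =====
-- from typing import Any
--
-- _REPORTING_SIGNAL_TERMS = (
--     "reporting package",
--     "deliverable",
--     "financial statement",
--     "compliance certificate",
--     "shall",
--     "must",
--     "required",
-- )
--
-- def _normalize_text(value: Any) -> str:
--     return str(value or "").strip()
--
-- def _candidate_rows_for_prompt(lines: list[dict[str, Any]], max_lines: int = 220) -> list[dict[str, Any]]:
--     prioritized: list[dict[str, Any]] = []
--     fallback: list[dict[str, Any]] = []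
--     for line in lines:
--         text = _normalize_text(line.get("text"))
--         if not text:
--             continue
--         payload_line = {
--             "doc_id": _normalize_text(line.get("doc_id")),
--             "doc_name": _normalize_text(line.get("doc_name")),
--             "locator_type": _normalize_text(line.get("locator_type")).lower(),
--             "locator_value": _normalize_text(line.get("locator_value")),
--             "page_or_sheet": _normalize_text(line.get("page_or_sheet")),
--             "text": text,
--         }
--         lowered = text.lower()
--         if any(term in lowered for term in _REPORTING_SIGNAL_TERMS):
--             prioritized.append(payload_line)
--         else:
--             fallback.append(payload_line)
--
--     ordered = prioritized + fallback
--     return ordered[:max_lines]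
-- ===== SOURCE B (Python) =====
-- from typing import Any
--
-- _REPORTING_SIGNAL_TERMS = (
--     "reporting package",
--     "deliverable",
--     "financial statement",
--     "compliance certificate",
--     "shall",
--     "must",
--     "required",
-- )
--
-- def _normalize_text(value: Any) -> str:
--     return str(value or "").strip()
--
-- def _candidate_rows_for_prompt(lines: list[dict[str, Any]], max_lines: int = 220) -> list[dict[str, Any]]:
--     # Build one tagged list, then let a stable sort on the priority flag
--     # produce the final order (signal lines first, original order kept).
--     items: list[tuple[int, dict[str, Any]]] = []
--     for line in lines:
--         text = _normalize_text(line.get("text"))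
--         if not text:
--             continue
--         payload_line = {
--             "doc_id": _normalize_text(line.get("doc_id")),
--             "doc_name": _normalize_text(line.get("doc_name")),
--             "locator_type": _normalize_text(line.get("locator_type")).lower(),
--             "locator_value": _normalize_text(line.get("locator_value")),
--             "page_or_sheet": _normalize_text(line.get("page_or_sheet")),
--             "text": text,
--         }
--         lowered = text.lower()
--         priority = 0 if any(term in lowered for term in _REPORTING_SIGNAL_TERMS) else 1
--         items.append((priority, payload_line))
--     return [payload for _, payload in sorted(items, key=lambda t: t[0])][:max_lines]
-- ===== Notes on version B (the rewrite author's own statement) =====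
-- stated objective: alternative
-- what changed: Replaces A's partition into two bucket lists concatenated at the end by a single pass that tags each payload with a 0/1 priority flag and obtains the final order with one stable sort on that flag.
import Mathlib
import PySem

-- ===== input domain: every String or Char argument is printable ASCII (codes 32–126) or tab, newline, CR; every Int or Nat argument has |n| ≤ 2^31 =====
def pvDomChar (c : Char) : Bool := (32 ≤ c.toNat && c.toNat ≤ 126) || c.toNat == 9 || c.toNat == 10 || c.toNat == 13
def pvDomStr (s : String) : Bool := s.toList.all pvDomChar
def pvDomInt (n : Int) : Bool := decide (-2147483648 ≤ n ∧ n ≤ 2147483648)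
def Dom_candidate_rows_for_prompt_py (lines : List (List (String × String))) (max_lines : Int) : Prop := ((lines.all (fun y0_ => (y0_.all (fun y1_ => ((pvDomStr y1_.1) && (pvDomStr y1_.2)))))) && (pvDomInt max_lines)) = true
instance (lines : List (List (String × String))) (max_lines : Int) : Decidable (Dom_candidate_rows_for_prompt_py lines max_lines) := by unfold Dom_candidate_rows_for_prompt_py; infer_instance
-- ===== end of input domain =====

-- B replaces A's two-bucket partition + concatenation by one tagged list ordered
-- with a single stable sort on a 0/1 priority flag (objective: alternative).

-- ===== PORT A =====
-- shared module helpers: _REPORTING_SIGNAL_TERMS and _normalize_text(line.get(k))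
def pvTerms : List String :=
  ["reporting package", "deliverable", "financial statement",
   "compliance certificate", "shall", "must", "required"]

def pvNorm (line : List (String × String)) (k : String) : String :=
  PySem.Str.strip (((PySem.Dict.ofList line).get? k).getD "")

def pvPayload (line : List (String × String)) (text : String) : List (String × String) :=
  [("doc_id", pvNorm line "doc_id"),
   ("doc_name", pvNorm line "doc_name"),
   ("locator_type", PySem.Str.lower (pvNorm line "locator_type")),
   ("locator_value", pvNorm line "locator_value"),
   ("page_or_sheet", pvNorm line "page_or_sheet"),
   ("text", text)]

def pvSignal (text : String) : Bool :=
  pvTerms.any (fun term => PySem.Str.isIn term (PySem.Str.lower text))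

def candidate_rows_for_prompt_py (lines : List (List (String × String))) (max_lines : Int) : List (List (String × String)) :=
  let st := lines.foldl
    (fun (st : List (List (String × String)) × List (List (String × String))) line =>
      let text := pvNorm line "text"
      if text = "" then st
      else
        let payload_line := pvPayload line text
        if pvSignal text then (st.1 ++ [payload_line], st.2)
        else (st.1, st.2 ++ [payload_line]))
    ([], [])
  PySem.List.slice (st.1 ++ st.2) none (some max_lines)

-- ===== PORT B =====
-- the single pass building the tagged (priority, payload) list
def pvItems : List (List (String × String)) → List (Int × List (String × String))
  | [] => []
  | line :: rest =>
    if pvNorm line "text" = "" then pvItems rest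
    else ((if pvSignal (pvNorm line "text") then (0 : Int) else 1),
          pvPayload line (pvNorm line "text")) :: pvItems rest

def candidate_rows_for_prompt_py_alt (lines : List (List (String × String))) (max_lines : Int) : List (List (String × String)) :=
  PySem.List.slice
    ((PySem.List.sorted (pvItems lines) (fun t => t.1)).map Prod.snd)
    none (some max_lines)

-- ===== PRECONDITION & SPEC =====
def Spec_candidate_rows_for_prompt_py (lines : List (List (String × String))) (max_lines : Int) (out : List (List (String × String))) : Prop := out = candidate_rows_for_prompt_py_alt lines max_lines
instance (lines : List (List (String × String))) (max_lines : Int) (out : List (List (String × String))) : Decidable (Spec_candidate_rows_for_prompt_py lines max_lines out) := by unfold Spec_candidate_rows_for_prompt_py; infer_instance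

-- ===== CLAIM (what is proved, stated in full; the proofs are below) =====
def Claim_equal_candidate_rows_for_prompt_py : Prop := ∀ (lines : List (List (String × String))) (max_lines : Int), Dom_candidate_rows_for_prompt_py lines max_lines → Spec_candidate_rows_for_prompt_py lines max_lines (candidate_rows_for_prompt_py lines max_lines)

-- ===== LEMMAS AND PROOFS =====

-- insertBy walks past a prefix it does not go before
theorem pv_insertBy_skip {α : Type} (before : α → α → Bool) (x : α) (a : List α) (l : List α)
    (h : ∀ y ∈ a, before x y = false) :
    PySem.List.insertBy before x (a ++ l) = a ++ PySem.List.insertBy before x l := by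
  induction a with
  | nil => simp
  | cons y a ih =>
    have hy : before x y = false := h y (by simp)
    simp [PySem.List.insertBy, hy, ih (fun z hz => h z (by simp [hz]))]

-- insertBy puts x in front of a list it goes before everywhere
theorem pv_insertBy_front {α : Type} (before : α → α → Bool) (x : α) (l : List α)
    (h : ∀ y ∈ l, before x y = true) :
    PySem.List.insertBy before x l = x :: l := by
  cases l with
  | nil => simp [PySem.List.insertBy]
  | cons y l => simp [PySem.List.insertBy, h y (by simp)]

-- insertBy appends x when it goes before nothing
theorem pv_insertBy_last {α : Type} (before : α → α → Bool) (x : α) (l : List α)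
    (h : ∀ y ∈ l, before x y = false) :
    PySem.List.insertBy before x l = l ++ [x] := by
  induction l with
  | nil => simp [PySem.List.insertBy]
  | cons y l ih =>
    simp [PySem.List.insertBy, h y (by simp), ih (fun z hz => h z (by simp [hz]))]

-- the stable-sort loop on 0/1-flagged items keeps two ordered blocks
theorem pv_foldl_insertBy_01 {P : Type} (xs : List (Int × P)) :
    ∀ (a0 a1 : List (Int × P)),
      (∀ p ∈ xs, p.1 = 0 ∨ p.1 = 1) →
      (∀ p ∈ a0, p.1 = 0) → (∀ p ∈ a1, p.1 = 1) →
      xs.foldl (fun acc x => PySem.List.insertBy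
          (fun a b => decide ((fun t : Int × P => t.1) a < (fun t : Int × P => t.1) b)) x acc)
        (a0 ++ a1)
      = (a0 ++ xs.filter (fun t => t.1 == 0)) ++ (a1 ++ xs.filter (fun t => !(t.1 == 0))) := by
  induction xs with
  | nil => intro a0 a1 _ _ _; simp
  | cons x xs ih =>
    intro a0 a1 hx h0 h1
    have hxk := hx x (by simp)
    rcases hxk with hk | hk
    · have hstep : PySem.List.insertBy
          (fun a b => decide ((fun t : Int × P => t.1) a < (fun t : Int × P => t.1) b)) x (a0 ++ a1)
          = (a0 ++ [x]) ++ a1 := by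
        rw [pv_insertBy_skip _ _ a0 a1 (fun y hy => by simp [h0 y hy, hk])]
        rw [pv_insertBy_front _ _ a1 (fun y hy => by simp [h1 y hy, hk])]
        simp
      rw [List.foldl_cons, hstep,
        ih (a0 ++ [x]) a1 (fun p hp => hx p (by simp [hp]))
          (fun p hp => by rcases List.mem_append.mp hp with h | h
                          · exact h0 p h
                          · simp at h; simp [h, hk]) h1]
      simp [hk]
    · have hstep : PySem.List.insertBy
          (fun a b => decide ((fun t : Int × P => t.1) a < (fun t : Int × P => t.1) b)) x (a0 ++ a1)
          = a0 ++ (a1 ++ [x]) := by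
        rw [pv_insertBy_skip _ _ a0 a1 (fun y hy => by simp [h0 y hy, hk])]
        rw [pv_insertBy_last _ _ a1 (fun y hy => by simp [h1 y hy, hk])]
      rw [List.foldl_cons, hstep,
        ih a0 (a1 ++ [x]) (fun p hp => hx p (by simp [hp])) h0
          (fun p hp => by rcases List.mem_append.mp hp with h | h
                          · exact h1 p h
                          · simp at h; simp [h, hk])]
      simp [hk]

theorem pv_items_01 (lines : List (List (String × String))) :
    ∀ p ∈ pvItems lines, p.1 = 0 ∨ p.1 = 1 := by
  induction lines with
  | nil => simp [pvItems]
  | cons line rest ih =>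
    intro p hp
    rw [pvItems] at hp
    by_cases h : pvNorm line "text" = ""
    · rw [if_pos h] at hp; exact ih p hp
    · rw [if_neg h] at hp
      rcases List.mem_cons.mp hp with hp | hp
      · subst hp; by_cases hs : pvSignal (pvNorm line "text") <;> simp [hs]
      · exact ih p hp

-- sorting 0/1-flagged items is exactly the stable two-block split
theorem pv_sorted_01 {P : Type} (xs : List (Int × P))
    (h : ∀ p ∈ xs, p.1 = 0 ∨ p.1 = 1) :
    PySem.List.sorted xs (fun t => t.1)
      = xs.filter (fun t => t.1 == 0) ++ xs.filter (fun t => !(t.1 == 0)) := by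
  rw [PySem.List.sorted_eq_foldl_insertBy]
  have := pv_foldl_insertBy_01 xs [] [] h (by simp) (by simp)
  simpa using this

-- A's partition loop computes the snd-projections of the two filtered blocks
theorem pv_loop_eq (lines : List (List (String × String))) :
    ∀ (p f : List (List (String × String))),
      lines.foldl
        (fun (st : List (List (String × String)) × List (List (String × String))) line =>
          let text := pvNorm line "text"
          if text = "" then st
          else
            let payload_line := pvPayload line text
            if pvSignal text then (st.1 ++ [payload_line], st.2)
            else (st.1, st.2 ++ [payload_line]))
        (p, f)
      = (p ++ ((pvItems lines).filter (fun t => t.1 == 0)).map Prod.snd,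
         f ++ ((pvItems lines).filter (fun t => !(t.1 == 0))).map Prod.snd) := by
  induction lines with
  | nil => intro p f; simp [pvItems]
  | cons line rest ih =>
    intro p f
    by_cases h : pvNorm line "text" = ""
    · simp only [List.foldl_cons, h, if_true, ih]
      simp [pvItems, h]
    · by_cases hs : pvSignal (pvNorm line "text")
      · simp only [List.foldl_cons, h, if_false, hs, if_true, ih]
        simp [pvItems, h, hs]
      · simp only [List.foldl_cons, h, if_false, hs, ih]
        simp [pvItems, h, hs]

-- ===== VERDICT (by name: the statement is the Claim_ definition above) =====
theorem candidate_rows_for_prompt_py_spec : Claim_equal_candidate_rows_for_prompt_py := by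
  intro lines max_lines _
  unfold Spec_candidate_rows_for_prompt_py
  unfold candidate_rows_for_prompt_py candidate_rows_for_prompt_py_alt
  rw [pv_sorted_01 (pvItems lines) (pv_items_01 lines)]
  rw [pv_loop_eq lines [] []]
  simp
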